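-- pv_equiv track=rewrite | github.com/trevorbaca/baca | scf/specifiers/Specifier/Specifier.py | indent_format_pieces
-- ===== SOURCE A (Python) =====
-- def indent_format_pieces(name, format_pieces):
--     result = []
--     if len(format_pieces) == 1:
--         result.append('\t{}={},'.format(name, format_pieces[0]))
--     elif 1 < len(format_pieces):
--         result.append('\t{}={}'.format(name, format_pieces[0]))
--         for format_piece in format_pieces[1:-1]:
--             result.append('\t' + format_piece)
--         result.append('\t' + format_pieces[-1] + ',')
--     return result
-- ===== SOURCE B (Python) =====
-- def indent_format_pieces(name, format_pieces):
--     result = []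
--     for i, piece in enumerate(format_pieces):
--         prefix = name + '=' if i == 0 else ''
--         result.append('\t' + prefix + piece)
--     if result:
--         result[-1] = result[-1] + ','
--     return result
-- ===== Notes on version B (the rewrite author's own statement) =====
-- stated objective: simpler
-- what changed: Replaces the len==1 / len>1 branch with [0]/[1:-1]/[-1] slicing by a single uniform enumerate loop that prefixes 'name=' only at index 0, plus one trailing-comma fixup on the last line.
import Mathlib
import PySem

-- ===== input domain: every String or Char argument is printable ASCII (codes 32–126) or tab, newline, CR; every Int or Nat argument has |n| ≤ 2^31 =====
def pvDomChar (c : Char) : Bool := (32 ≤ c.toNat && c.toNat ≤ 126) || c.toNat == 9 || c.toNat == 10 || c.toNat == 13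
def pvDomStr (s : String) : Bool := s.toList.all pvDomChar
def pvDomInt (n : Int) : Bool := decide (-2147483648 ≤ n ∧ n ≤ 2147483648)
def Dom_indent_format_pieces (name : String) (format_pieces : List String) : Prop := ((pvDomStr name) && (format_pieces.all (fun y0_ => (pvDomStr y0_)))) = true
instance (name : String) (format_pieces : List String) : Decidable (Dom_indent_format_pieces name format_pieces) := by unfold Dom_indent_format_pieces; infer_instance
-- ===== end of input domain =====

-- B replaces A's len==1 / len>1 branching with slicing by one uniform enumerate
-- loop plus a trailing-comma fixup (objective: simpler).

-- ===== PORT A =====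
-- Literal port of A: empty result, branch on length, slice [1:-1], index [0] and [-1].
-- (In the branches where pyGet? is used its index is in range, so `.getD ""` never fires.)
def indent_format_pieces (name : String) (format_pieces : List String) : List String :=
  let result : List String := []
  if format_pieces.length == 1 then
    result ++ ["\t" ++ name ++ "=" ++ ((PySem.List.pyGet? format_pieces 0).getD "") ++ ","]
  else if 1 < format_pieces.length then
    let result := result ++ ["\t" ++ name ++ "=" ++ ((PySem.List.pyGet? format_pieces 0).getD "")]
    let result := (PySem.List.slice format_pieces (some 1) (some (-1))).foldl
        (fun acc piece => acc ++ ["\t" ++ piece]) result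
    result ++ ["\t" ++ ((PySem.List.pyGet? format_pieces (-1)).getD "") ++ ","]
  else result

-- ===== PORT B =====
-- Literal port of B: one enumerate loop, then "result[-1] += ','" guarded by non-emptiness.
def indent_format_pieces_alt (name : String) (format_pieces : List String) : List String :=
  let result := (PySem.List.enumerate format_pieces 0).foldl
      (fun acc ip =>
        let pre := if ip.1 == 0 then name ++ "=" else ""
        acc ++ ["\t" ++ pre ++ ip.2]) []
  match result.getLast? with
  | none => result
  | some last => result.dropLast ++ [last ++ ","]

-- ===== PRECONDITION & SPEC =====
def Spec_indent_format_pieces (name : String) (format_pieces : List String) (out : List String) : Prop := out = indent_format_pieces_alt name format_pieces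
instance (name : String) (format_pieces : List String) (out : List String) : Decidable (Spec_indent_format_pieces name format_pieces out) := by unfold Spec_indent_format_pieces; infer_instance

-- ===== CLAIM (what is proved, stated in full; the proofs are below) =====
def Claim_equal_indent_format_pieces : Prop := ∀ (name : String) (format_pieces : List String), Dom_indent_format_pieces name format_pieces → Spec_indent_format_pieces name format_pieces (indent_format_pieces name format_pieces)

-- ===== LEMMAS AND PROOFS =====

-- A's inner loop appends one line per piece.
theorem foldl_append_map (l acc : List String) :
    l.foldl (fun acc piece => acc ++ ["\t" ++ piece]) acc = acc ++ l.map (fun p => "\t" ++ p) := by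
  induction l generalizing acc with
  | nil => simp
  | cons x xs ih => simp [List.foldl_cons, ih, List.append_assoc]

-- B's loop over enumerate starting at a positive index never adds the name prefix.
theorem foldl_enumerate_pos (name : String) (l acc : List String) (s : Int) (hs : 1 ≤ s) :
    (PySem.List.enumerate l s).foldl
        (fun acc ip =>
          let pre := if ip.1 == 0 then name ++ "=" else ""
          acc ++ ["\t" ++ pre ++ ip.2]) acc
      = acc ++ l.map (fun p => "\t" ++ p) := by
  induction l generalizing acc s with
  | nil => simp [PySem.List.enumerate_nil]
  | cons x xs ih =>
    have hx : (s == 0) = false := by simp; omega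
    rw [PySem.List.enumerate_cons, List.foldl_cons]
    simp only [hx]
    rw [ih _ (s + 1) (by omega)]
    simp [List.append_assoc]

theorem slice_one_negone (a : String) (rest : List String) :
    PySem.List.slice (a :: rest) (some 1) (some (-1)) = rest.dropLast := by
  simp [PySem.List.slice, PySem.List.clampIdx]
  cases rest with
  | nil => simp
  | cons b rs =>
    rw [if_neg (by omega)]
    simp [List.dropLast_eq_take]

-- "result[-1] = result[-1] + ','" on a non-empty result, written with an explicit last element.
theorem fixup (xs : List String) (y : String) :
    (match (xs ++ [y]).getLast? with
     | none => xs ++ [y]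
     | some last => (xs ++ [y]).dropLast ++ [last ++ ","]) = xs ++ [y ++ ","] := by
  simp

theorem indent_format_pieces_spec : Claim_equal_indent_format_pieces := by
  intro name fps _
  unfold Spec_indent_format_pieces indent_format_pieces indent_format_pieces_alt
  match fps with
  | [] => simp [PySem.List.enumerate_nil]
  | [a] =>
    simp [PySem.List.enumerate_cons, PySem.List.enumerate_nil, String.append_assoc]
  | a :: b :: rs =>
    -- evaluate B's loop
    rw [PySem.List.enumerate_cons, List.foldl_cons]
    simp only [beq_self_eq_true]
    rw [foldl_enumerate_pos name (b :: rs) _ (0 + 1) (by omega)]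
    -- evaluate A's pieces
    rw [slice_one_negone, foldl_append_map]
    simp only [List.length_cons, PySem.List.pyGet?_zero_cons, PySem.List.pyGet?_neg_one,
      Option.getD_some, List.nil_append]
    have hne : (b :: rs) ≠ [] := by simp
    split_ifs with h1 h2
    · simp at h1
    · -- the real case: both sides are first :: middle lines ++ [last line ++ ","]
      have hmap : (b :: rs).map (fun p => "\t" ++ p)
          = ((b :: rs).dropLast).map (fun p => "\t" ++ p) ++ ["\t" ++ (b :: rs).getLast hne] := by
        conv_lhs => rw [← List.dropLast_append_getLast hne]
        simp
      rw [hmap]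
      rw [← List.append_assoc]
      rw [fixup]
      rw [List.getLast?_cons_cons, List.getLast?_eq_some_getLast (h := hne)]
      simp [String.append_assoc]
    · omega
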